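-- pv_equiv track=rewrite | github.com/recsys-benchmark/FashionStylist | Benchamark/Task3/mllm_eval.py | strip_mode_sensitive_prompt_lines
-- ===== SOURCE A (Python) =====
-- MODE_SENSITIVE_PROMPT_LINE_PREFIXES = (
--     "Keep this reasoning hidden.",
--     "Do not output your reasoning process, chain-of-thought, scratch work, bullet analysis, or `<think>` content.",
--     "- Do not output reasoning, explanations, or any extra text outside the required JSON.",
--     "Do not output reasoning, explanations, or any extra text outside the required JSON.",
--     "- Do not output `<think>`, `<analysis>`, or any hidden-reasoning markers.",
--     "Do not output `<think>`, `<analysis>`, or any hidden-reasoning markers.",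
--     "Only output `<think>...</think>` when the evaluator explicitly asks for visible reasoning.",
--     "If the evaluator asks for visible reasoning, place that reasoning before the final JSON.",
--     "If the evaluator asks for visible reasoning, place that reasoning before the final JSON and",
--     "If the evaluator asks for visible reasoning, keep it extremely short:",
--     "- Perform the reasoning internally first, then output only the final JSON.",
--     "Perform the reasoning internally first, then output only the final JSON.",
--     "- If output length becomes tight, stop the reasoning immediately and output the final JSON object.",
--     "If output length becomes tight, stop the reasoning immediately and output the final JSON object.",
--     "The first non-whitespace character of the response must be `{` and the last must be `}`.",
--     "Return JSON only.",
-- )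
--
-- def strip_mode_sensitive_prompt_lines(prompt_template: str) -> str:
--     cleaned_lines: list[str] = []
--     previous_blank = False
--     for raw_line in prompt_template.strip().splitlines():
--         stripped = raw_line.strip()
--         if stripped and any(stripped.startswith(prefix) for prefix in MODE_SENSITIVE_PROMPT_LINE_PREFIXES):
--             continue
--         if not stripped:
--             if previous_blank:
--                 continue
--             previous_blank = True
--             cleaned_lines.append("")
--             continue
--         previous_blank = False
--         cleaned_lines.append(raw_line.rstrip())
--     return "\n".join(cleaned_lines).strip()
-- ===== SOURCE B (Python) =====
-- MODE_SENSITIVE_PROMPT_LINE_PREFIXES = (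
--     "Keep this reasoning hidden.",
--     "Do not output your reasoning process, chain-of-thought, scratch work, bullet analysis, or `<think>` content.",
--     "- Do not output reasoning, explanations, or any extra text outside the required JSON.",
--     "Do not output reasoning, explanations, or any extra text outside the required JSON.",
--     "- Do not output `<think>`, `<analysis>`, or any hidden-reasoning markers.",
--     "Do not output `<think>`, `<analysis>`, or any hidden-reasoning markers.",
--     "Only output `<think>...</think>` when the evaluator explicitly asks for visible reasoning.",
--     "If the evaluator asks for visible reasoning, place that reasoning before the final JSON.",
--     "If the evaluator asks for visible reasoning, place that reasoning before the final JSON and",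
--     "If the evaluator asks for visible reasoning, keep it extremely short:",
--     "- Perform the reasoning internally first, then output only the final JSON.",
--     "Perform the reasoning internally first, then output only the final JSON.",
--     "- If output length becomes tight, stop the reasoning immediately and output the final JSON object.",
--     "If output length becomes tight, stop the reasoning immediately and output the final JSON object.",
--     "The first non-whitespace character of the response must be `{` and the last must be `}`.",
--     "Return JSON only.",
-- )
--
--
-- def strip_mode_sensitive_prompt_lines(prompt_template: str) -> str:
--     # pass 1: drop prefix-flagged lines, rstrip the survivors (blank lines become "")
--     kept = [
--         line.rstrip()
--         for line in prompt_template.strip().splitlines()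
--         if not line.strip().startswith(MODE_SENSITIVE_PROMPT_LINE_PREFIXES)
--     ]
--     # pass 2: keep a blank line only when the line before it is non-blank
--     collapsed = [
--         line for prev, line in zip([None] + kept, kept) if line != "" or prev != ""
--     ]
--     return "\n".join(collapsed).strip()
-- ===== Notes on version B (the rewrite author's own statement) =====
-- stated objective: simpler
-- what changed: A's single fused loop with a previous_blank flag is replaced by two declarative passes: a filter+rstrip comprehension over the lines, then a neighbour-pair filter (zip with the shifted list) that drops a blank line whose predecessor is blank.
import Mathlib
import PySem

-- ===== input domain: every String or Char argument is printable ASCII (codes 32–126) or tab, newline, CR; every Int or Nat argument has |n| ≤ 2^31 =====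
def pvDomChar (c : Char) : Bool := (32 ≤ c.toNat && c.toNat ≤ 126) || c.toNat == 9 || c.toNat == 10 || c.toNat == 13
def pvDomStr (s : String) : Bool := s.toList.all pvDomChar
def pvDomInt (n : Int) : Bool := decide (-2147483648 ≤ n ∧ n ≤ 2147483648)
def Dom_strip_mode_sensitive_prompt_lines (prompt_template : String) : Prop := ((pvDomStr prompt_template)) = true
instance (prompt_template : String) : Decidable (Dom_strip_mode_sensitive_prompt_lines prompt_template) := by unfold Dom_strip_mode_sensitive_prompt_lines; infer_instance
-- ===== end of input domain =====

-- B replaces A's single stateful loop (flag `previous_blank`) by two declarative passes: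
-- a filter+rstrip comprehension, then a neighbour-pair filter that drops a blank line
-- whose predecessor is blank; objective: simpler.

def pvPrefixes : List String := [
  "Keep this reasoning hidden.",
  "Do not output your reasoning process, chain-of-thought, scratch work, bullet analysis, or `<think>` content.",
  "- Do not output reasoning, explanations, or any extra text outside the required JSON.",
  "Do not output reasoning, explanations, or any extra text outside the required JSON.",
  "- Do not output `<think>`, `<analysis>`, or any hidden-reasoning markers.",
  "Do not output `<think>`, `<analysis>`, or any hidden-reasoning markers.",
  "Only output `<think>...</think>` when the evaluator explicitly asks for visible reasoning.",
  "If the evaluator asks for visible reasoning, place that reasoning before the final JSON.",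
  "If the evaluator asks for visible reasoning, place that reasoning before the final JSON and",
  "If the evaluator asks for visible reasoning, keep it extremely short:",
  "- Perform the reasoning internally first, then output only the final JSON.",
  "Perform the reasoning internally first, then output only the final JSON.",
  "- If output length becomes tight, stop the reasoning immediately and output the final JSON object.",
  "If output length becomes tight, stop the reasoning immediately and output the final JSON object.",
  "The first non-whitespace character of the response must be `{` and the last must be `}`.",
  "Return JSON only."]

-- ===== PORT A =====
-- the body of A's for-loop, acting on the state (cleaned_lines, previous_blank)
def pvStepA (st : List String × Bool) (raw_line : String) : List String × Bool :=
  let stripped := PySem.Str.strip raw_line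
  if (stripped != "") && pvPrefixes.any (fun pre => PySem.Str.startswith stripped pre) then
    st
  else if stripped == "" then
    (if st.2 then st else (st.1 ++ [""], true))
  else
    (st.1 ++ [PySem.Str.rstrip raw_line], false)

def strip_mode_sensitive_prompt_lines (prompt_template : String) : String :=
  let res := (PySem.Str.splitlines (PySem.Str.strip prompt_template)).foldl pvStepA ([], false)
  PySem.Str.strip (PySem.Str.join "\n" res.1)

-- ===== PORT B =====
def strip_mode_sensitive_prompt_lines_alt (prompt_template : String) : String :=
  -- pass 1: drop prefix-flagged lines, rstrip the survivors
  let kept := ((PySem.Str.splitlines (PySem.Str.strip prompt_template)).filter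
      (fun line => !(pvPrefixes.any (fun pre => PySem.Str.startswith (PySem.Str.strip line) pre)))).map
      (fun line => PySem.Str.rstrip line)
  -- pass 2: keep a blank line only when the line before it is non-blank
  let collapsed := ((none :: kept.map some).zip kept).filterMap
      (fun pl => if pl.2 != "" || pl.1 != some "" then some pl.2 else none)
  PySem.Str.strip (PySem.Str.join "\n" collapsed)

-- ===== PRECONDITION & SPEC =====
def Spec_strip_mode_sensitive_prompt_lines (prompt_template : String) (out : String) : Prop := out = strip_mode_sensitive_prompt_lines_alt prompt_template
instance (prompt_template : String) (out : String) : Decidable (Spec_strip_mode_sensitive_prompt_lines prompt_template out) := by unfold Spec_strip_mode_sensitive_prompt_lines; infer_instance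

-- ===== CLAIM (what is proved, stated in full; the proofs are below) =====
def Claim_equal_strip_mode_sensitive_prompt_lines : Prop := ∀ (prompt_template : String), Dom_strip_mode_sensitive_prompt_lines prompt_template → Spec_strip_mode_sensitive_prompt_lines prompt_template (strip_mode_sensitive_prompt_lines prompt_template)

-- ===== LEMMAS AND PROOFS =====

-- the shared intermediate: a blank-run-collapsing pass (proof artefact, used by no port)
def pvCollapse : Bool → List String → List String
  | _, [] => []
  | pb, k :: ks =>
    if k == "" then (if pb then pvCollapse true ks else "" :: pvCollapse true ks)
    else k :: pvCollapse false ks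

lemma pv_forall_dropWhile_iff (p : Char → Bool) (l : List Char) :
    (∀ x ∈ l.dropWhile p, p x) ↔ (∀ x ∈ l, p x) := by
  constructor
  · intro h x hx
    rw [← List.takeWhile_append_dropWhile (p := p) (l := l)] at hx
    rcases List.mem_append.1 hx with h1 | h2
    · exact List.mem_takeWhile_imp h1
    · exact h x h2
  · intro h x hx
    exact h x ((List.dropWhile_sublist _).subset hx)

lemma pv_rstrip_nil_iff (cs : List Char) :
    PySem.Chars.rstrip cs = [] ↔ ∀ c ∈ cs, PySem.Chars.isspace c := by
  simp [PySem.Chars.rstrip, List.dropWhile_eq_nil_iff]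

lemma pv_strip_nil_iff (cs : List Char) :
    PySem.Chars.strip cs = [] ↔ ∀ c ∈ cs, PySem.Chars.isspace c := by
  rw [PySem.Chars.strip, pv_rstrip_nil_iff, PySem.Chars.lstrip, pv_forall_dropWhile_iff]

-- Python fact behind the equivalence: a line is all-whitespace iff its rstrip is empty
lemma pv_blank_iff (s : String) : (PySem.Str.strip s = "") ↔ (PySem.Str.rstrip s = "") := by
  simp only [PySem.Str.strip, PySem.Str.rstrip, ← String.toList_eq_nil_iff,
    String.toList_ofList, pv_strip_nil_iff, pv_rstrip_nil_iff]

lemma pv_empty_no_prefix :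
    pvPrefixes.any (fun pre => PySem.Str.startswith "" pre) = false := by decide

-- characterization of A's loop
lemma pv_foldA (raws : List String) : ∀ (acc : List String) (pb : Bool),
    (raws.foldl pvStepA (acc, pb)).1 =
      acc ++ pvCollapse pb ((raws.filter
        (fun line => !(pvPrefixes.any (fun pre => PySem.Str.startswith (PySem.Str.strip line) pre)))).map
        (fun line => PySem.Str.rstrip line)) := by
  induction raws with
  | nil => intro acc pb; simp [pvCollapse]
  | cons raw rest ih =>
    intro acc pb
    rw [List.foldl_cons]
    by_cases hpref : (pvPrefixes.any fun pre => PySem.Str.startswith (PySem.Str.strip raw) pre) = true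
    · have hne : ¬ (PySem.Str.strip raw = "") := by
        intro h
        rw [h, pv_empty_no_prefix] at hpref
        exact Bool.false_ne_true hpref
      have h1 : (PySem.Str.strip raw != "") = true := bne_iff_ne.mpr hne
      have hstep : pvStepA (acc, pb) raw = (acc, pb) := by
        simp only [pvStepA]; rw [hpref, h1]; simp
      rw [hstep, List.filter_cons_of_neg (by simpa using hpref), ih]
    · have hany : (pvPrefixes.any fun pre => PySem.Str.startswith (PySem.Str.strip raw) pre) = false := by
        simpa using hpref
      by_cases hb : PySem.Str.strip raw = ""
      · have hrb : PySem.Str.rstrip raw = "" := (pv_blank_iff raw).mp hb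
        cases pb with
        | true =>
          have hstep : pvStepA (acc, true) raw = (acc, true) := by simp only [pvStepA]; rw [hb]; simp
          rw [hstep, List.filter_cons_of_pos (by simpa using hany), List.map_cons, hrb, ih]
          simp [pvCollapse]
        | false =>
          have hstep : pvStepA (acc, false) raw = (acc ++ [""], true) := by simp only [pvStepA]; rw [hb]; simp
          rw [hstep, List.filter_cons_of_pos (by simpa using hany), List.map_cons, hrb, ih]
          simp [pvCollapse]
      · have hrb : ¬ (PySem.Str.rstrip raw = "") := fun h => hb ((pv_blank_iff raw).mpr h)
        have hrbb : (PySem.Str.rstrip raw == "") = false := beq_eq_false_iff_ne.mpr hrb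
        have hstep : pvStepA (acc, pb) raw = (acc ++ [PySem.Str.rstrip raw], false) := by
          simp only [pvStepA]; rw [hany]; simp [hb]
        rw [hstep, List.filter_cons_of_pos (by simpa using hany), List.map_cons, ih]
        simp [pvCollapse, hrbb]

-- characterization of B's neighbour-pair filter
lemma pv_zipColl (ks : List String) : ∀ (prev : Option String),
    ((prev :: ks.map some).zip ks).filterMap
        (fun pl => if pl.2 != "" || pl.1 != some "" then some pl.2 else none) =
      pvCollapse (prev == some "") ks := by
  induction ks with
  | nil => intro prev; rfl
  | cons k ks ih =>
    intro prev
    simp only [List.map_cons, List.zip_cons_cons, List.filterMap_cons]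
    rw [ih (some k)]
    by_cases hk : k = ""
    · subst hk
      by_cases hp : prev = some ""
      · subst hp; simp [pvCollapse]
      · simp [pvCollapse, hp]
    · have hkb : (k == "") = false := beq_eq_false_iff_ne.mpr hk
      simp [pvCollapse, hk, hkb]

-- ===== VERDICT (by name: the statement is the Claim_ definition above) =====
theorem strip_mode_sensitive_prompt_lines_spec : Claim_equal_strip_mode_sensitive_prompt_lines := by
  intro pt _
  show _ = _
  simp only [strip_mode_sensitive_prompt_lines, strip_mode_sensitive_prompt_lines_alt]
  rw [pv_foldA, pv_zipColl]
  simp
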